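-- pv_equiv track=rewrite | github.com/quintinigneous26/peerlink | p2p_engine/protocol/messages.py | is_valid_protocol_id
-- ===== SOURCE A (Python) =====
-- def is_valid_protocol_id(protocol_id: str) -> bool:
--     """
--     验证协议 ID 是否有效
--
--     有效的协议 ID 应该:
--     1. 以 '/' 开头
--     2. 不包含空格或控制字符
--     3. 不为空
--
--     Args:
--         protocol_id: 要验证的协议 ID
--
--     Returns:
--         是否有效
--     """
--     if not protocol_id:
--         return False
--
--     if not protocol_id.startswith('/'):
--         return False
--
--     # 检查是否包含无效字符
--     for char in protocol_id:
--         if ord(char) < 0x20:  # 控制字符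
--             return False
--         if char in (' ', '\t', '\n', '\r'):
--             return False
--
--     return True
-- ===== SOURCE B (Python) =====
-- import re
--
-- _PROTOCOL_ID_RE = re.compile(r'/[^\x00-\x20]*')
--
-- def is_valid_protocol_id(protocol_id: str) -> bool:
--     return bool(_PROTOCOL_ID_RE.fullmatch(protocol_id))
-- ===== Notes on version B (the rewrite author's own statement) =====
-- stated objective: idiomatic
-- what changed: Replaced the explicit per-character loop with early returns by a single precompiled regular-expression fullmatch of /[^\x00-\x20]* over the whole string.
import Mathlib
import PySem

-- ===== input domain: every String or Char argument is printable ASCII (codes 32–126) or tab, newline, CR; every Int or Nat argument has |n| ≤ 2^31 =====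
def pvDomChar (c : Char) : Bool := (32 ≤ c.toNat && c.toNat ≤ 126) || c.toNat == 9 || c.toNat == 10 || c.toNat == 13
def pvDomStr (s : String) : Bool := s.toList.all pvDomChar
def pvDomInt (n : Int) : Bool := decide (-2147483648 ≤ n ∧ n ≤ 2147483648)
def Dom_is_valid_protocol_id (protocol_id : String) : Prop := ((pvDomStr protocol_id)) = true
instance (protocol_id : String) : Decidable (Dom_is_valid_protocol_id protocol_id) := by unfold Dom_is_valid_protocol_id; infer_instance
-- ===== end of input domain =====

-- B replaces A's per-character loop by a single regular-expression fullmatch (idiomatic, same cost).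


-- ===== PORT A =====
-- the 'for char in protocol_id' loop with its two early returns
def pvLoopA : List Char → Bool
  | [] => true
  | c :: cs =>
    if c.toNat < 0x20 then false
    else if c = ' ' ∨ c = '\t' ∨ c = '\n' ∨ c = '\r' then false
    else pvLoopA cs

def is_valid_protocol_id (protocol_id : String) : Bool :=
  if protocol_id.toList = [] then false
  else if ¬ PySem.Str.startswith protocol_id "/" then false
  else pvLoopA protocol_id.toList

-- ===== PORT B =====
-- port of re.fullmatch(r'/[^\x00-\x20]*', s): the whole string is one '/'
-- followed by zero or more characters with code point above 0x20
def is_valid_protocol_id_alt (protocol_id : String) : Bool :=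
  match protocol_id.toList with
  | [] => false
  | c :: cs => c = '/' && cs.all (fun ch => 0x20 < ch.toNat)

-- ===== PRECONDITION & SPEC =====
def Spec_is_valid_protocol_id (protocol_id : String) (out : Bool) : Prop := out = is_valid_protocol_id_alt protocol_id
instance (protocol_id : String) (out : Bool) : Decidable (Spec_is_valid_protocol_id protocol_id out) := by unfold Spec_is_valid_protocol_id; infer_instance

-- ===== CLAIM (what is proved, stated in full; the proofs are below) =====
def Claim_equal_is_valid_protocol_id : Prop := ∀ (protocol_id : String), Dom_is_valid_protocol_id protocol_id → Spec_is_valid_protocol_id protocol_id (is_valid_protocol_id protocol_id)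

-- ===== LEMMAS AND PROOFS =====

-- A's loop accepts exactly the lists whose characters all have code above 0x20
theorem pvLoopA_eq_all (cs : List Char) :
    pvLoopA cs = cs.all (fun ch => 0x20 < ch.toNat) := by
  induction cs with
  | nil => rfl
  | cons c cs ih =>
    simp only [pvLoopA, List.all_cons]
    by_cases h1 : c.toNat < 0x20
    · simp [h1]; omega
    · simp only [h1, if_false]
      by_cases h2 : c = ' ' ∨ c = '\t' ∨ c = '\n' ∨ c = '\r'
      · have hsp : c.toNat ≤ 0x20 := by
          rcases h2 with h | h | h | h <;> subst h <;> decide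
        have h32 : ¬ (0x20 < c.toNat) := by omega
        simp [h2, h32]
      · have hne : c.toNat ≠ 32 := fun h => h2 (Or.inl (by
          have := Char.ofNat_toNat c
          rw [h] at this
          exact this.symm))
        have h32 : 0x20 < c.toNat := by omega
        simp [h2, h32, ih]

-- ===== VERDICT (by name: the statement is the Claim_ definition above) =====
theorem is_valid_protocol_id_spec : Claim_equal_is_valid_protocol_id := by
  intro s _
  unfold Spec_is_valid_protocol_id is_valid_protocol_id is_valid_protocol_id_alt
  cases hls : s.toList with
  | nil => simp
  | cons c cs =>
    have key : PySem.Chars.startswith s.toList "/".toList = true ↔ c = '/' := by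
      rw [PySem.Chars.startswith_iff, hls]
      constructor
      · rintro ⟨t, ht⟩
        have h2 : "/".toList = ['/'] := rfl
        rw [h2] at ht
        simpa using (congrArg (·.head?) ht).symm
      · rintro rfl
        exact ⟨cs, rfl⟩
    have hst : PySem.Str.startswith s "/" = decide (c = '/') := by
      simp only [PySem.Str.startswith_eq]
      rw [Bool.eq_iff_iff]
      simpa using key
    rw [hst]
    by_cases hc : c = '/'
    · subst hc
      simp [pvLoopA_eq_all, pvLoopA]
    · simp [hc]
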